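-- pv_equiv track=rewrite | github.com/BStalewski/alexander | alexander/src/find_imported.py | find_first_symbol
-- ===== SOURCE A (Python) =====
-- def find_first_symbol(line, symbols):
--     '''Find first occurence of any of symbols in the line of the code.
--        Return tuple containing index of the found symbol and the found symbol,
--        if any was found, otherwise return None.'''
--     symbol_tuples = []
--     for symbol in symbols:
--         first_index = line.find(symbol)
--         first_index = first_index if first_index != -1 else len(line)
--         symbol_tuples.append((first_index, symbol))
--
--     first_found = min(symbol_tuples)
--     if first_found[0] == len(line):
--         return None
--     else:
--         return first_found
-- ===== SOURCE B (Python) =====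
-- def find_first_symbol(line, symbols):
--     '''Single left-to-right scan of the line: at each position take the
--        symbols that start there; the first position with a match wins,
--        ties broken by the smallest symbol.'''
--     for i in range(len(line)):
--         matched = [symbol for symbol in symbols if line.startswith(symbol, i)]
--         if matched:
--             return (i, min(matched))
--     return None
-- ===== Notes on version B (the rewrite author's own statement) =====
-- stated objective: faster
-- what changed: Instead of computing every symbol's first index with line.find over the whole line and taking the min of (index, symbol) tuples, B scans the line left to right once and returns at the first position where any symbol starts, breaking ties by the smallest symbol.
import Mathlib
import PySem

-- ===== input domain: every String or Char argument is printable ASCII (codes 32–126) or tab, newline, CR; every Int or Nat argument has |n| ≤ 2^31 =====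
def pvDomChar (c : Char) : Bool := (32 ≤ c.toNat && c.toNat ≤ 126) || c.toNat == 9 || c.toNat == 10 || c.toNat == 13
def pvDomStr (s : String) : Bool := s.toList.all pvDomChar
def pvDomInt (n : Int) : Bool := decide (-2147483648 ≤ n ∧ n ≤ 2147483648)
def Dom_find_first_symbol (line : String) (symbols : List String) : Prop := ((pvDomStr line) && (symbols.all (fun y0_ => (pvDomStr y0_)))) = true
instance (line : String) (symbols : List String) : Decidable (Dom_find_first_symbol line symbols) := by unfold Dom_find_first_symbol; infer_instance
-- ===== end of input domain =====

-- B replaces A's per-symbol find+min with a single left-to-right scan of the line that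
-- returns at the first position where any symbol starts (objective: faster — the timing
-- run measured B faster; early exit instead of a full line.find per symbol).


-- ===== PORT A =====
def find_first_symbol (line : String) (symbols : List String) : Option (Int × String) :=
  let symbol_tuples : List (Int × String) := symbols.foldl (fun acc symbol =>
    let first_index := PySem.Str.find line symbol
    let first_index := if first_index ≠ -1 then first_index else PySem.Str.len line
    acc ++ [(first_index, symbol)]) []
  -- min(symbol_tuples): Python tuple min = min2? with the two components as keys;
  -- min([]) raises ValueError in Python — excluded by Pre_, the port returns none there
  match PySem.List.min2? symbol_tuples Prod.fst Prod.snd with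
  | none => none
  | some first_found =>
    if first_found.1 = PySem.Str.len line then none else some first_found

-- ===== PORT B =====
-- loop body of B: iterate i over range(len(line)); the current suffix line[i:] is carried
-- so that line.startswith(symbol, i) is exactly Chars.startswith on that suffix
def ffsGo (symbols : List String) (i : Nat) : List Char → Option (Int × String)
  | [] => none
  | c :: rest =>
    let matched := symbols.filter (fun symbol => PySem.Chars.startswith (c :: rest) symbol.toList)
    match PySem.List.min? matched (fun s => s) with
    | some m => some ((i : Int), m)
    | none => ffsGo symbols (i + 1) rest

def find_first_symbol_alt (line : String) (symbols : List String) : Option (Int × String) :=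
  ffsGo symbols 0 line.toList

-- ===== PRECONDITION & SPEC =====
-- Pre_ excludes only symbols = [], on which A's min([]) raises ValueError.
def Pre_find_first_symbol (line : String) (symbols : List String) : Prop := symbols ≠ []
instance (line : String) (symbols : List String) : Decidable (Pre_find_first_symbol line symbols) := by unfold Pre_find_first_symbol; infer_instance
def pvWitness_find_first_symbol : String × List String := ("import foo.bar", ["import ", "from "])

def Spec_find_first_symbol (line : String) (symbols : List String) (out : Option (Int × String)) : Prop := out = find_first_symbol_alt line symbols
instance (line : String) (symbols : List String) (out : Option (Int × String)) : Decidable (Spec_find_first_symbol line symbols out) := by unfold Spec_find_first_symbol; infer_instance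

-- ===== CLAIM (what is proved, stated in full; the proofs are below) =====
def Claim_equal_find_first_symbol : Prop := ∀ (line : String) (symbols : List String), Dom_find_first_symbol line symbols → Pre_find_first_symbol line symbols → Spec_find_first_symbol line symbols (find_first_symbol line symbols)
-- ===== LEMMAS AND PROOFS =====

-- the symbols that start at position given by the suffix `suf` of the line
def matchedOn (symbols : List String) (suf : List Char) : List String :=
  symbols.filter (fun symbol => PySem.Chars.startswith suf symbol.toList)

-- A's adjusted first index of a symbol
def adjIdx (cs : List Char) (s : List Char) : Int :=
  if PySem.Chars.find cs s ≠ -1 then PySem.Chars.find cs s else (cs.length : Int)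

lemma ffsGo_none (symbols : List String) (suf : List Char) (i : Nat)
    (h : ∀ j < suf.length, matchedOn symbols (suf.drop j) = []) :
    ffsGo symbols i suf = none := by
  induction suf generalizing i with
  | nil => rfl
  | cons c rest ih =>
    have h0 : matchedOn symbols (c :: rest) = [] := by
      simpa using h 0 (by simp)
    simp only [ffsGo]
    rw [show symbols.filter (fun symbol => PySem.Chars.startswith (c :: rest) symbol.toList) = matchedOn symbols (c :: rest) from rfl, h0]
    rw [show PySem.List.min? ([] : List String) (fun s => s) = none from rfl]
    exact ih (i + 1) (fun j hj => by simpa using h (j + 1) (by simpa using hj))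

lemma ffsGo_found (symbols : List String) (suf : List Char) (i j0 : Nat)
    (hj0 : j0 < suf.length)
    (hmin : ∀ j < j0, matchedOn symbols (suf.drop j) = [])
    (hne : matchedOn symbols (suf.drop j0) ≠ []) :
    ffsGo symbols i suf =
      (PySem.List.min? (matchedOn symbols (suf.drop j0)) (fun s => s)).map
        (fun m => (((i + j0 : Nat) : Int), m)) := by
  induction suf generalizing i j0 with
  | nil => simp at hj0
  | cons c rest ih =>
    cases j0 with
    | zero =>
      simp only [List.drop_zero] at hne ⊢
      obtain ⟨m, hm⟩ : ∃ m, PySem.List.min? (matchedOn symbols (c :: rest)) (fun s => s) = some m := by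
        cases hmm : PySem.List.min? (matchedOn symbols (c :: rest)) (fun s => s) with
        | none => exact absurd ((PySem.List.min?_eq_none_iff _ _).1 hmm) hne
        | some m => exact ⟨m, rfl⟩
      simp only [ffsGo]
      rw [show symbols.filter (fun symbol => PySem.Chars.startswith (c :: rest) symbol.toList) = matchedOn symbols (c :: rest) from rfl, hm]
      simp
    | succ k =>
      have h0 : matchedOn symbols (c :: rest) = [] := by
        simpa using hmin 0 (by omega)
      simp only [ffsGo]
      rw [show symbols.filter (fun symbol => PySem.Chars.startswith (c :: rest) symbol.toList) = matchedOn symbols (c :: rest) from rfl, h0]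
      rw [show PySem.List.min? ([] : List String) (fun s => s) = none from rfl]
      have := ih (i + 1) k (by simpa using hj0)
        (fun j hj => by simpa using hmin (j + 1) (by omega))
        (by simpa using hne)
      simpa [Nat.add_assoc, Nat.add_comm 1 k] using this

def pairLex (a b : Int × String) : Prop := a.1 < b.1 ∨ (a.1 = b.1 ∧ a.2 ≤ b.2)

lemma pairLex_trans {a b c : Int × String} (h1 : pairLex a b) (h2 : pairLex b c) : pairLex a c := by
  unfold pairLex at *
  rcases h1 with h | ⟨e, le⟩ <;> rcases h2 with h' | ⟨e', le'⟩
  · left; omega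
  · left; omega
  · left; omega
  · right; exact ⟨by omega, le.trans le'⟩

lemma min2?_pair_spec (xs : List (Int × String)) (hne : xs ≠ []) :
    ∃ m, PySem.List.min2? xs Prod.fst Prod.snd = some m ∧ m ∈ xs ∧
      ∀ y ∈ xs, pairLex m y := by
  cases xs with
  | nil => exact absurd rfl hne
  | cons x t =>
  clear hne
  induction t generalizing x with
  | nil =>
    refine ⟨x, rfl, by simp, ?_⟩
    intro y hy; simp at hy; subst hy; right; simp
  | cons y t ih =>
    have hstep : PySem.List.min2? (x :: y :: t) Prod.fst Prod.snd
        = PySem.List.min2? ((if (decide (y.1 < x.1) || !decide (x.1 < y.1) && decide (y.2 < x.2)) = true then y else x) :: t) Prod.fst Prod.snd := by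
      simp only [PySem.List.min2?, List.foldl_cons]
      rcases ite_eq_or_eq ((decide (y.1 < x.1) || !decide (x.1 < y.1) && decide (y.2 < x.2)) = true) (some y) (some x) with h | h <;> rw [h] <;> split <;> first | rfl | simp_all
    by_cases hc : (decide (y.1 < x.1) || !decide (x.1 < y.1) && decide (y.2 < x.2)) = true
    · rw [hstep, if_pos hc]
      obtain ⟨m, h1, h2, h3⟩ := ih y
      have hyx : pairLex y x := by
        simp only [Bool.or_eq_true, Bool.and_eq_true, Bool.not_eq_true', decide_eq_true_eq,
          decide_eq_false_iff_not, not_lt] at hc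
        rcases hc with h | ⟨h1', h2'⟩
        · left; exact h
        · rcases eq_or_lt_of_le h1' with e | l
          · right; exact ⟨e, le_of_lt h2'⟩
          · left; exact l
      refine ⟨m, h1, ?_, ?_⟩
      · simp only [List.mem_cons] at h2 ⊢; tauto
      · intro z hz
        simp only [List.mem_cons] at hz
        rcases hz with hz | hz | hz
        · rw [hz]; exact pairLex_trans (h3 y (by simp)) hyx
        · rw [hz]; exact h3 y (by simp)
        · exact h3 z (by simp [hz])
    · rw [hstep, if_neg hc]
      obtain ⟨m, h1, h2, h3⟩ := ih x
      have hxy : pairLex x y := by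
        simp only [Bool.or_eq_true, Bool.and_eq_true, Bool.not_eq_true', decide_eq_true_eq,
          decide_eq_false_iff_not, not_or, not_and, not_lt] at hc
        obtain ⟨h1', h2'⟩ := hc
        rcases eq_or_lt_of_le h1' with e | l
        · right; exact ⟨e, h2' (le_of_eq e.symm)⟩
        · left; exact l
      refine ⟨m, h1, ?_, ?_⟩
      · simp only [List.mem_cons] at h2 ⊢; tauto
      · intro z hz
        simp only [List.mem_cons] at hz
        rcases hz with hz | hz | hz
        · rw [hz]; exact h3 x (by simp)
        · rw [hz]; exact pairLex_trans (h3 x (by simp)) hxy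
        · exact h3 z (by simp [hz])


-- ===== VERDICT (by name: the statement is the Claim_ definition above) =====
-- occurrence of s ∈ symbols at position j makes matchedOn nonempty
lemma matchedOn_ne_nil {symbols : List String} {s : String} {suf : List Char}
    (hs : s ∈ symbols) (hp : s.toList <+: suf) :
    matchedOn symbols suf ≠ [] := by
  apply List.ne_nil_of_mem (a := s)
  simp [matchedOn, List.mem_filter, hs, PySem.Chars.startswith_iff, hp]

-- every adjusted index is at least j0 when no symbol starts before j0
lemma adjIdx_ge {symbols : List String} {cs : List Char} {j0 : Nat} {s : String}
    (hs : s ∈ symbols) (hj0n : j0 ≤ cs.length)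
    (hmin : ∀ j < j0, matchedOn symbols (cs.drop j) = []) :
    (j0 : Int) ≤ adjIdx cs s.toList := by
  unfold adjIdx
  split
  · rename_i hne
    have h0 : 0 ≤ PySem.Chars.find cs s.toList := by
      have := PySem.Chars.neg_one_le_find cs s.toList
      omega
    obtain ⟨hpre, -⟩ := PySem.Chars.find_spec h0
    by_contra hlt
    push_neg at hlt
    have hj : (PySem.Chars.find cs s.toList).toNat < j0 := by omega
    exact matchedOn_ne_nil hs hpre (hmin _ hj)
  · exact_mod_cast hj0n

-- A's tuple loop is a map, and the lets zeta-reduce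
lemma find_first_symbol_eq (line : String) (symbols : List String) :
    find_first_symbol line symbols =
      match PySem.List.min2? (symbols.map (fun s => (adjIdx line.toList s.toList, s))) Prod.fst Prod.snd with
      | none => none
      | some ff => if ff.1 = ((line.toList.length : Nat) : Int) then none else some ff := by
  unfold find_first_symbol
  rw [show (fun (acc : List (Int × String)) (symbol : String) =>
        let first_index := PySem.Str.find line symbol
        let first_index := if first_index ≠ -1 then first_index else PySem.Str.len line
        acc ++ [(first_index, symbol)])
      = (fun acc symbol => acc ++ [(adjIdx line.toList symbol.toList, symbol)]) from rfl,
    PySem.List.foldl_append_singleton_eq_map (fun symbol => (adjIdx line.toList symbol.toList, symbol)) symbols [],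
    List.nil_append]
  rfl

theorem find_first_symbol_spec : Claim_equal_find_first_symbol := by
  intro line symbols _ hpre
  unfold Spec_find_first_symbol find_first_symbol_alt
  unfold Pre_find_first_symbol at hpre
  rw [find_first_symbol_eq]
  set cs := line.toList with hcs
  set n := cs.length with hn
  by_cases H : ∃ j, j < n ∧ matchedOn symbols (cs.drop j) ≠ []
  · -- some symbol occurs in the line
    have hfind := Nat.find_spec H
    set j0 := Nat.find H with hj0
    obtain ⟨hj0n, hne⟩ := hfind
    have hmin : ∀ j < j0, matchedOn symbols (cs.drop j) = [] := by
      intro j hj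
      have := Nat.find_min H hj
      by_contra hc
      exact this ⟨by omega, hc⟩
    -- B's value
    obtain ⟨mb, hmb⟩ : ∃ mb, PySem.List.min? (matchedOn symbols (cs.drop j0)) (fun s => s) = some mb := by
      cases hmm : PySem.List.min? (matchedOn symbols (cs.drop j0)) (fun s => s) with
      | none => exact absurd ((PySem.List.min?_eq_none_iff _ _).1 hmm) hne
      | some m => exact ⟨m, rfl⟩
    have hB : ffsGo symbols 0 cs = some ((j0 : Int), mb) := by
      rw [ffsGo_found symbols cs 0 j0 hj0n hmin hne, hmb]
      simp
    -- mb starts at j0 and its adjusted index is j0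
    have hmbmem := PySem.List.min?_mem hmb
    have hmbsym : mb ∈ symbols := (List.mem_filter.1 hmbmem).1
    have hmbpre : mb.toList <+: cs.drop j0 := by
      have := (List.mem_filter.1 hmbmem).2
      simpa [PySem.Chars.startswith_iff] using this
    have hadj_mb : adjIdx cs mb.toList = (j0 : Int) := by
      have hinf : mb.toList <:+: cs := hmbpre.isInfix.trans (List.drop_suffix j0 cs).isInfix
      have hne1 : PySem.Chars.find cs mb.toList ≠ -1 := by
        simp only [ne_eq, PySem.Chars.find_eq_neg_one_iff]; exact not_not_intro hinf
      have h0 : 0 ≤ PySem.Chars.find cs mb.toList := by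
        have := PySem.Chars.neg_one_le_find cs mb.toList; omega
      obtain ⟨-, hfirst⟩ := PySem.Chars.find_spec h0
      have hle : (PySem.Chars.find cs mb.toList).toNat ≤ j0 := by
        by_contra hc
        push_neg at hc
        exact hfirst j0 hc hmbpre
      have hge : (j0 : Int) ≤ adjIdx cs mb.toList := adjIdx_ge hmbsym (le_of_lt hj0n) hmin
      unfold adjIdx at hge ⊢
      rw [if_pos hne1] at hge ⊢
      omega
    -- A's minimum
    have htne : symbols.map (fun s => (adjIdx cs s.toList, s)) ≠ [] := by
      simpa using hpre
    obtain ⟨m, h1, h2, h3⟩ := min2?_pair_spec _ htne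
    rw [h1, hB]
    show (if m.1 = (n : Int) then none else some m) = some ((j0 : Int), mb)
    -- m.1 = j0 and m.2 ≤ mb
    have hy : ((j0 : Int), mb) ∈ symbols.map (fun s => (adjIdx cs s.toList, s)) := by
      refine List.mem_map.2 ⟨mb, hmbsym, ?_⟩
      rw [hadj_mb]
    obtain ⟨s, hssym, hsm⟩ := List.mem_map.1 h2
    have hm1ge : (j0 : Int) ≤ m.1 := by
      rw [← hsm]; exact adjIdx_ge hssym (le_of_lt hj0n) hmin
    have hlex := h3 _ hy
    have hm1 : m.1 = (j0 : Int) := by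
      rcases hlex with h | ⟨h, -⟩ <;> [omega; exact h]
    have hm2le : m.2 ≤ mb := by
      rcases hlex with h | ⟨-, h⟩
      · omega
      · exact h
    -- m.2 is itself matched at j0, so mb ≤ m.2
    have hm2mem : m.2 ∈ matchedOn symbols (cs.drop j0) := by
      have hsm2 : s = m.2 := by rw [← hsm]
      have hadj_s : adjIdx cs s.toList = (j0 : Int) := by rw [← hsm] at hm1; exact hm1
      have hsfind : PySem.Chars.find cs s.toList = (j0 : Int) := by
        unfold adjIdx at hadj_s
        by_cases hne1 : PySem.Chars.find cs s.toList ≠ -1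
        · rwa [if_pos hne1] at hadj_s
        · rw [if_neg hne1] at hadj_s
          exfalso; omega
      have h0 : 0 ≤ PySem.Chars.find cs s.toList := by rw [hsfind]; positivity
      obtain ⟨hpre2, -⟩ := PySem.Chars.find_spec h0
      rw [hsfind] at hpre2
      simp only [Int.toNat_natCast] at hpre2
      rw [← hsm2]
      simp [matchedOn, List.mem_filter, hssym, PySem.Chars.startswith_iff, hpre2]
    have hmble : mb ≤ m.2 := PySem.List.min?_isMin hmb m.2 hm2mem
    have hmeq : m = ((j0 : Int), mb) := by
      cases m with
      | mk a b => exact congrArg₂ Prod.mk hm1 (le_antisymm hm2le hmble)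
    rw [if_neg (show ¬ m.1 = (n : Int) by rw [hm1]; exact_mod_cast Nat.ne_of_lt hj0n), hmeq]
  · -- no symbol occurs before the end of the line
    push_neg at H
    have hB : ffsGo symbols 0 cs = none := ffsGo_none symbols cs 0 H
    have htne : symbols.map (fun s => (adjIdx cs s.toList, s)) ≠ [] := by
      simpa using hpre
    obtain ⟨m, h1, h2, -⟩ := min2?_pair_spec _ htne
    rw [h1, hB]
    show (if m.1 = (n : Int) then none else some m) = none
    obtain ⟨s, hssym, hsm⟩ := List.mem_map.1 h2
    have hm1 : m.1 = (n : Int) := by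
      rw [← hsm]
      unfold adjIdx
      split
      · rename_i hne1
        have h0 : 0 ≤ PySem.Chars.find cs s.toList := by
          have := PySem.Chars.neg_one_le_find cs s.toList; omega
        obtain ⟨hpre2, -⟩ := PySem.Chars.find_spec h0
        have hlen := PySem.Chars.find_le_length cs s.toList
        by_contra hc
        have hlt : (PySem.Chars.find cs s.toList).toNat < n := by omega
        exact matchedOn_ne_nil hssym hpre2 (H _ hlt)
      · rfl
    rw [if_pos hm1]
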